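-- pv_equiv track=rewrite | github.com/eqmvii/claudiablot | ocr_items.py | _word_lengths
-- ===== SOURCE A (Python) =====
-- WORD_X_GAP = 10   # horizontal gap between chars to break a word
--
-- def _word_lengths(line_chars):
--     """Return list of word lengths (in chars) for noise filtering."""
--     if not line_chars:
--         return []
--     words = [[line_chars[0]]]
--     for c in line_chars[1:]:
--         prev = words[-1][-1]
--         gap = c[0] - (prev[0] + prev[2])
--         if gap > WORD_X_GAP:
--             words.append([c])
--         else:
--             words[-1].append(c)
--     return [len(w) for w in words]
-- ===== SOURCE B (Python) =====
-- WORD_X_GAP = 10   # horizontal gap between chars to break a word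
--
-- def _word_lengths(line_chars):
--     """Return list of word lengths (in chars) for noise filtering.
--
--     B: greedily consume one word at a time from the front of the remaining
--     list (inner scan follows the chain of small gaps), appending only its
--     length; no nested word lists are built.
--     """
--     res = []
--     rest = line_chars
--     while rest:
--         k = 1
--         prev = rest[0]
--         rest = rest[1:]
--         while rest and rest[0][0] - (prev[0] + prev[2]) <= WORD_X_GAP:
--             prev = rest[0]
--             rest = rest[1:]
--             k += 1
--         res.append(k)
--     return res
-- ===== Notes on version B (the rewrite author's own statement) =====
-- stated objective: simpler
-- what changed: Instead of accumulating nested word lists and mapping len over them, B greedily consumes one word at a time from the remaining list with an inner gap-chain scan and records only its length.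
import Mathlib
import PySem

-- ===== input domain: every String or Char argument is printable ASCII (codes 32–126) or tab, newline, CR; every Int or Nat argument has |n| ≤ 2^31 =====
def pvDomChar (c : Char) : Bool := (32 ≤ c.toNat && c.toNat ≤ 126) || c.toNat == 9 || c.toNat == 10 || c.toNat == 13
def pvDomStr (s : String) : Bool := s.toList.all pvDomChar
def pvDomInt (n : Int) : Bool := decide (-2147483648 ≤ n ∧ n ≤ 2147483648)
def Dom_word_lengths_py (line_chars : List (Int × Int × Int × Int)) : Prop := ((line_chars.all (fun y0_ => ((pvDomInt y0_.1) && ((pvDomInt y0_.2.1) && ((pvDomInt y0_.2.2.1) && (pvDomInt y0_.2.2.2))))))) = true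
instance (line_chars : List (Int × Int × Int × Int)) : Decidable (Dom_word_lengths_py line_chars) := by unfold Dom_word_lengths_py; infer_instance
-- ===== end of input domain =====

-- B replaces A's accumulation of nested word lists (append to the last word, then map len)
-- by a greedy scan that consumes one word at a time and records only its length ("simpler").

-- ===== PORT A =====
-- one step of A's for-loop: words is the list of words built so far (always nonempty,
-- each word nonempty); 'words[-1][-1]' / 'words[-1].append(c)' become getLastD/dropLast.
def wlpStep (words : List (List (Int × Int × Int × Int))) (c : Int × Int × Int × Int) :
    List (List (Int × Int × Int × Int)) :=
  let prev := (words.getLastD []).getLastD (0, 0, 0, 0)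
  let gap := c.1 - (prev.1 + prev.2.2.1)
  if gap > 10 then words ++ [[c]]
  else words.dropLast ++ [words.getLastD [] ++ [c]]

def word_lengths_py (line_chars : List (Int × Int × Int × Int)) : List Int :=
  match line_chars with
  | [] => []
  | c0 :: rest =>
    let words := rest.foldl wlpStep [[c0]]
    words.map (fun w => (w.length : Int))

-- ===== PORT B =====
-- inner while loop of B: follow the chain of gaps ≤ WORD_X_GAP, counting; returns
-- the word length and the unconsumed remainder.
def wlpTake (prev : Int × Int × Int × Int) (rest : List (Int × Int × Int × Int)) (k : Int) :
    Int × List (Int × Int × Int × Int) :=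
  match rest with
  | [] => (k, [])
  | c :: tl =>
    if c.1 - (prev.1 + prev.2.2.1) ≤ 10 then wlpTake c tl (k + 1)
    else (k, c :: tl)

theorem wlpTake_len_le (prev : Int × Int × Int × Int) (rest : List (Int × Int × Int × Int))
    (k : Int) : (wlpTake prev rest k).2.length ≤ rest.length := by
  induction rest generalizing prev k with
  | nil => simp [wlpTake]
  | cons c tl ih =>
    simp only [wlpTake]
    split
    · exact le_trans (ih c (k + 1)) (by simp)
    · simp

def word_lengths_py_alt (line_chars : List (Int × Int × Int × Int)) : List Int :=
  match line_chars with
  | [] => []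
  | c :: tl =>
    (wlpTake c tl 1).1 :: word_lengths_py_alt (wlpTake c tl 1).2
termination_by line_chars.length
decreasing_by
  have h := wlpTake_len_le c tl 1
  simp only [List.length_cons]
  omega

-- ===== PRECONDITION & SPEC =====
def Spec_word_lengths_py (line_chars : List (Int × Int × Int × Int)) (out : List Int) : Prop := out = word_lengths_py_alt line_chars
instance (line_chars : List (Int × Int × Int × Int)) (out : List Int) : Decidable (Spec_word_lengths_py line_chars out) := by unfold Spec_word_lengths_py; infer_instance

-- ===== CLAIM (what is proved, stated in full; the proofs are below) =====
def Claim_equal_word_lengths_py : Prop := ∀ (line_chars : List (Int × Int × Int × Int)), Dom_word_lengths_py line_chars → Spec_word_lengths_py line_chars (word_lengths_py line_chars)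

-- ===== LEMMAS AND PROOFS =====

theorem wlpStep_eq (words : List (List (Int × Int × Int × Int)))
    (c : Int × Int × Int × Int) :
    wlpStep words c =
      if c.1 - (((words.getLastD []).getLastD (0, 0, 0, 0)).1 +
          ((words.getLastD []).getLastD (0, 0, 0, 0)).2.2.1) > 10
      then words ++ [[c]]
      else words.dropLast ++ [words.getLastD [] ++ [c]] := rfl

theorem alt_nil : word_lengths_py_alt [] = [] := by
  rw [word_lengths_py_alt.eq_def]

theorem alt_cons (c : Int × Int × Int × Int) (tl : List (Int × Int × Int × Int)) :
    word_lengths_py_alt (c :: tl) =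
      (wlpTake c tl 1).1 :: word_lengths_py_alt (wlpTake c tl 1).2 := by
  rw [word_lengths_py_alt.eq_def]

theorem wlpStep_ne_nil (words : List (List (Int × Int × Int × Int)))
    (c : Int × Int × Int × Int) : wlpStep words c ≠ [] := by
  rw [wlpStep_eq]
  split <;> simp

theorem wlpStep_frozen (ws vs : List (List (Int × Int × Int × Int)))
    (c : Int × Int × Int × Int) (h : vs ≠ []) :
    wlpStep (ws ++ vs) c = ws ++ wlpStep vs c := by
  rcases vs.eq_nil_or_concat with rfl | ⟨L, b, rfl⟩
  · exact absurd rfl h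
  · rw [wlpStep_eq, wlpStep_eq]
    simp only [List.concat_eq_append, ← List.append_assoc]
    rw [List.getLastD_concat, List.getLastD_concat, List.dropLast_concat,
      List.dropLast_concat]
    split <;> simp

theorem foldl_frozen (cs : List (Int × Int × Int × Int))
    (ws vs : List (List (Int × Int × Int × Int))) (h : vs ≠ []) :
    cs.foldl wlpStep (ws ++ vs) = ws ++ cs.foldl wlpStep vs := by
  induction cs generalizing vs with
  | nil => rfl
  | cons c cs ih =>
    simp only [List.foldl_cons, wlpStep_frozen ws vs c h]
    exact ih _ (wlpStep_ne_nil vs c)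

-- the fold over the tail with last word u ++ [p] equals B's greedy scan
theorem wlp_key (cs : List (Int × Int × Int × Int)) (p : Int × Int × Int × Int)
    (u : List (Int × Int × Int × Int)) :
    (cs.foldl wlpStep [u ++ [p]]).map (fun w => (w.length : Int)) =
      (wlpTake p cs ((u.length : Int) + 1)).1 ::
        word_lengths_py_alt (wlpTake p cs ((u.length : Int) + 1)).2 := by
  induction cs generalizing p u with
  | nil => simp [wlpTake, alt_nil]
  | cons c cs ih =>
    simp only [List.foldl_cons, wlpTake]
    by_cases hg : c.1 - (p.1 + p.2.2.1) ≤ 10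
    · have hstep : wlpStep [u ++ [p]] c = [(u ++ [p]) ++ [c]] := by
        rw [wlpStep_eq]
        simp [not_lt.mpr hg]
      rw [hstep, if_pos hg]
      have := ih c (u ++ [p])
      simpa [add_assoc, add_comm, add_left_comm] using this
    · have hstep : wlpStep [u ++ [p]] c = [u ++ [p]] ++ [[c]] := by
        rw [wlpStep_eq]
        simp [lt_of_not_ge hg]
      rw [hstep, if_neg hg]
      rw [foldl_frozen cs [u ++ [p]] [[c]] (by simp)]
      have h2 := ih c []
      simp only [List.nil_append, List.length_nil, Nat.cast_zero, zero_add] at h2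
      simp only [List.map_cons, List.cons_append, List.nil_append, h2]
      rw [← alt_cons]
      simp

-- ===== VERDICT (by name: the statement is the Claim_ definition above) =====
theorem word_lengths_py_spec : Claim_equal_word_lengths_py := by
  intro line_chars _
  unfold Spec_word_lengths_py
  cases line_chars with
  | nil => simp [word_lengths_py, alt_nil]
  | cons c tl =>
    show (tl.foldl wlpStep [[c]]).map (fun w => (w.length : Int)) = word_lengths_py_alt (c :: tl)
    have := wlp_key tl c []
    simp only [List.nil_append, List.length_nil, Nat.cast_zero, zero_add] at this
    rw [this, ← alt_cons]
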